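-- pv_equiv track=rewrite | github.com/Goyatuzo/python-problems | code_forces/1401/c/mere_array.py | mere_array
-- ===== SOURCE A (Python) =====
-- from typing import List
--
-- def mere_array(arr: List[int]) -> str:
-- 	minimum = min(arr)
--
-- 	sorted_arr = sorted(arr)
--
-- 	for i in range(len(arr)):
-- 		if arr[i] != sorted_arr[i]:
-- 			if arr[i] % minimum != 0 or sorted_arr[i] % minimum != 0:
-- 				return 'NO'
--
-- 	# Reaching this point means all GCDs were found
-- 	return 'YES'
-- ===== SOURCE B (Python) =====
-- from typing import List
--
-- def mere_array(arr: List[int]) -> str: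
--     m = min(arr)
--     movable = sorted(x for x in arr if m != 0 and x % m == 0)
--     it = iter(movable)
--     cand = [next(it) if (m != 0 and x % m == 0) else x for x in arr]
--     return 'YES' if all(a <= b for a, b in zip(cand, cand[1:])) else 'NO'
-- ===== Notes on version B (the rewrite author's own statement) =====
-- stated objective: alternative
-- what changed: Instead of A's index-by-index comparison of arr with sorted(arr) plus a divisibility test at each mismatch, B sorts only the values divisible by the minimum, reinserts them in order into their original slots, and answers by checking that the rebuilt list is non-decreasing.
import Mathlib
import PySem

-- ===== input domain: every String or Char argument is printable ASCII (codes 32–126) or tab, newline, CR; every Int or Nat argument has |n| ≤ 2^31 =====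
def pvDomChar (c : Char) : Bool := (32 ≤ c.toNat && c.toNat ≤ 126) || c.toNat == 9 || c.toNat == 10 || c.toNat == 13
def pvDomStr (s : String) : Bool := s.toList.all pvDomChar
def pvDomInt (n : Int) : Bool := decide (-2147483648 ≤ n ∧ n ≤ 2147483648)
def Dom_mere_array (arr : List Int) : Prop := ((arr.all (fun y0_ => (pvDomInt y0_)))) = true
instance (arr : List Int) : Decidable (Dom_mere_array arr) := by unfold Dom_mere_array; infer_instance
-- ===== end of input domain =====

-- B rebuilds the array by sorting only the movable (divisible-by-min) values back into their own
-- slots and checking monotonicity, instead of A's position-by-position comparison with sorted(arr);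
-- objective: alternative (a genuinely different decomposition, similar cost).

-- ===== PORT A =====
-- the index loop of A: for i in range(len(arr)): …  (early return 'NO')
def mereLoopA (arr s : List Int) (m : Int) : List Int → String
  | [] => "YES"
  | i :: rest =>
    if PySem.List.pyGetD arr i 0 ≠ PySem.List.pyGetD s i 0 then
      if PySem.Int.mod (PySem.List.pyGetD arr i 0) m ≠ 0 ∨ PySem.Int.mod (PySem.List.pyGetD s i 0) m ≠ 0 then "NO"
      else mereLoopA arr s m rest
    else mereLoopA arr s m rest

def mere_array (arr : List Int) : String :=
  match PySem.List.min? arr (fun x => x) with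
  | none => ""   -- min([]) raises ValueError in Python; excluded by Pre_
  | some minimum =>
    let sorted_arr := PySem.List.sorted arr (fun x => x)
    mereLoopA arr sorted_arr minimum (PySem.List.pyRange 0 arr.length 1)

-- ===== PORT B =====
-- 'm != 0 and x % m == 0' (movable value)
def movableB (m x : Int) : Bool := m ≠ 0 && PySem.Int.mod x m == 0

-- the comprehension with next(it): consume the sorted movable values front-to-back at movable slots
def rebuildB (m : Int) : List Int → List Int → List Int
  | [], _ => []
  | x :: xs, vs =>
    if movableB m x then
      match vs with
      | v :: vs' => v :: rebuildB m xs vs'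
      | [] => x :: rebuildB m xs []   -- unreachable: one sorted value exists per movable slot
    else x :: rebuildB m xs vs

def mere_array_alt (arr : List Int) : String :=
  match PySem.List.min? arr (fun x => x) with
  | none => ""   -- min([]) raises ValueError in Python; excluded by Pre_
  | some m =>
    let movable := PySem.List.sorted (arr.filter (movableB m)) (fun x => x)
    let cand := rebuildB m arr movable
    -- all(a <= b for a, b in zip(cand, cand[1:]))
    if (cand.zip (PySem.List.slice cand (some 1) none)).all (fun p => decide (p.1 ≤ p.2)) then "YES" else "NO"

-- ===== PRECONDITION & SPEC =====
-- Pre_ excludes exactly the inputs where Python A raises: the empty list (ValueError from min),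
-- and arrays whose minimum is 0 while the array is not already sorted (ZeroDivisionError from %).
def Pre_mere_array (arr : List Int) : Prop :=
  arr ≠ [] ∧ ((0:Int) ∉ arr ∨ (∃ x ∈ arr, x < 0) ∨ List.IsChain (· ≤ ·) arr)
instance (arr : List Int) : Decidable (Pre_mere_array arr) := by unfold Pre_mere_array; infer_instance
def pvWitness_mere_array : List Int := [3, 1, 2]

def Spec_mere_array (arr : List Int) (out : String) : Prop := out = mere_array_alt arr
instance (arr : List Int) (out : String) : Decidable (Spec_mere_array arr out) := by unfold Spec_mere_array; infer_instance

-- ===== CLAIM (what is proved, stated in full; the proofs are below) =====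
def Claim_equal_mere_array : Prop := ∀ (arr : List Int), Dom_mere_array arr → Pre_mere_array arr → Spec_mere_array arr (mere_array arr)

-- ===== LEMMAS AND PROOFS =====

-- the pointwise relation A's loop checks at index i, phrased on values
theorem relAB (m a b : Int) :
    (a = b ∨ (PySem.Int.mod a m = 0 ∧ PySem.Int.mod b m = 0)) ↔
    (a = b ∨ (movableB m a = true ∧ movableB m b = true)) := by
  by_cases hm : m = 0
  · subst hm
    simp [movableB, PySem.Int.mod_eq_zero_iff_dvd]
    intro ha hb; omega
  · simp [movableB, hm, PySem.Int.mod_eq_zero_iff_dvd]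

theorem mereLoopA_yes_or_no (arr s : List Int) (m : Int) (l : List Int) :
    mereLoopA arr s m l = "YES" ∨ mereLoopA arr s m l = "NO" := by
  induction l with
  | nil => left; rfl
  | cons i rest ih =>
    simp only [mereLoopA]
    split_ifs <;> simp [ih]

theorem mereLoopA_eq_yes_iff (arr s : List Int) (m : Int) (l : List Int) :
    mereLoopA arr s m l = "YES" ↔
      ∀ i ∈ l, PySem.List.pyGetD arr i 0 = PySem.List.pyGetD s i 0 ∨
        (PySem.Int.mod (PySem.List.pyGetD arr i 0) m = 0 ∧ PySem.Int.mod (PySem.List.pyGetD s i 0) m = 0) := by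
  induction l with
  | nil => simp [mereLoopA]
  | cons i rest ih =>
    simp only [mereLoopA]
    split_ifs with h1 h2
    · simp only [List.mem_cons]
      constructor
      · intro h; exact absurd h (by decide)
      · intro h
        rcases h i (Or.inl rfl) with h' | h'
        · exact absurd h' h1
        · rcases h2 with hc | hc <;> [exact absurd h'.1 hc; exact absurd h'.2 hc]
    · push Not at h2
      simp only [List.mem_cons, ih]
      constructor
      · rintro h j (rfl | hj)
        · exact Or.inr h2
        · exact h j hj
      · intro h j hj; exact h j (Or.inr hj)
    · push Not at h1
      simp only [List.mem_cons, ih]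
      constructor
      · rintro h j (rfl | hj)
        · exact Or.inl h1
        · exact h j hj
      · intro h j hj; exact h j (Or.inr hj)

-- the zip-all test is Chain' (≤)
theorem zip_all_le_iff_chain' (l : List Int) :
    ((l.zip l.tail).all (fun p => decide (p.1 ≤ p.2)) = true) ↔ l.IsChain (· ≤ ·) := by
  induction l with
  | nil => simp
  | cons a t ih =>
    cases t with
    | nil => simp
    | cons b t' =>
      simp only [List.tail_cons, List.zip_cons_cons, List.all_cons, Bool.and_eq_true,
        decide_eq_true_eq, List.isChain_cons_cons]
      rw [← ih]
      simp only [List.tail_cons]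

-- rebuild is a permutation: the taken values followed by the fixed values
theorem rebuildB_perm (m : Int) (xs vs : List Int)
    (h : vs.length = (xs.filter (movableB m)).length) :
    (rebuildB m xs vs).Perm (vs ++ xs.filter (fun x => ! movableB m x)) := by
  induction xs generalizing vs with
  | nil =>
    simp only [List.filter_nil, List.length_nil, List.length_eq_zero_iff] at h
    subst h; simp [rebuildB]
  | cons x xs ih =>
    by_cases hx : movableB m x
    · rw [List.filter_cons_of_pos hx] at h
      cases vs with
      | nil => simp at h
      | cons v vs' =>
        simp only [List.length_cons, Nat.add_right_cancel_iff] at h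
        simp only [rebuildB, if_pos hx]
        have : (x :: xs).filter (fun x => ! movableB m x) = xs.filter (fun x => ! movableB m x) := by
          simp [hx]
        rw [this, List.cons_append]
        exact (ih vs' h).cons v
    · rw [List.filter_cons_of_neg hx] at h
      simp only [rebuildB, if_neg hx]
      have : (x :: xs).filter (fun x => ! movableB m x) = x :: xs.filter (fun x => ! movableB m x) := by
        simp [hx]
      rw [this]
      exact ((ih vs h).cons x).trans List.perm_middle.symm

-- if arr and ys agree pointwise up to movable slots, rebuilding from ys's movable values gives ys
theorem rebuildB_eq_of_forall₂ (m : Int) (xs ys : List Int)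
    (h : List.Forall₂ (fun a b => a = b ∨ (movableB m a = true ∧ movableB m b = true)) xs ys) :
    rebuildB m xs (ys.filter (movableB m)) = ys := by
  induction h with
  | nil => rfl
  | @cons a b xs ys hab _ ih =>
    by_cases ha : movableB m a
    · have hb : movableB m b = true := by
        rcases hab with rfl | ⟨_, hb⟩; · exact ha
        · exact hb
      rw [List.filter_cons_of_pos hb]
      simp [rebuildB, ha, ih]
    · have hab' : a = b := by
        rcases hab with rfl | ⟨ha', _⟩; · rfl
        · exact absurd ha' ha
      have hb : ¬ movableB m b = true := hab' ▸ ha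
      rw [List.filter_cons_of_neg hb]
      simp [rebuildB, hb, ih, hab']

-- conversely, if the rebuilt list equals ys then arr and ys agree pointwise up to movable slots
theorem forall₂_of_rebuildB_eq (m : Int) (xs : List Int) :
    ∀ (vs ys : List Int), (∀ v ∈ vs, movableB m v = true) →
    vs.length = (xs.filter (movableB m)).length →
    rebuildB m xs vs = ys →
    List.Forall₂ (fun a b => a = b ∨ (movableB m a = true ∧ movableB m b = true)) xs ys := by
  induction xs with
  | nil => rintro vs ys _ _ rfl; exact List.Forall₂.nil
  | cons x xs ih =>
    intro vs ys hvp hlen hr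
    by_cases hx : movableB m x
    · rw [List.filter_cons_of_pos hx] at hlen
      cases vs with
      | nil => simp at hlen
      | cons v vs' =>
        simp only [List.length_cons, Nat.add_right_cancel_iff] at hlen
        simp only [rebuildB, if_pos hx] at hr
        subst hr
        exact List.Forall₂.cons (Or.inr ⟨hx, hvp v (by simp)⟩)
          (ih vs' _ (fun u hu => hvp u (by simp [hu])) hlen rfl)
    · rw [List.filter_cons_of_neg hx] at hlen
      simp only [rebuildB, if_neg hx] at hr
      subst hr
      exact List.Forall₂.cons (Or.inl rfl) (ih vs _ hvp hlen rfl)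

-- the sorted movable values are exactly the movable values of sorted(arr), in order
theorem sorted_filter_eq (m : Int) (arr : List Int) :
    PySem.List.sorted (arr.filter (movableB m)) (fun x => x) =
      (PySem.List.sorted arr (fun x => x)).filter (movableB m) := by
  apply PySem.List.sorted_id_eq_of_perm_of_pairwise
  · exact (PySem.List.sorted_perm arr (fun x => x) false).filter _
  · exact (PySem.List.sorted_pairwise arr (fun x => x)).sublist List.filter_sublist

theorem cand_perm_arr (m : Int) (arr : List Int) :
    (rebuildB m arr (PySem.List.sorted (arr.filter (movableB m)) (fun x => x))).Perm arr := by
  have h1 := rebuildB_perm m arr (PySem.List.sorted (arr.filter (movableB m)) (fun x => x))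
    ((PySem.List.sorted_perm _ _ _).length_eq)
  refine h1.trans ?_
  exact (((PySem.List.sorted_perm _ _ false).append_right _).trans
    (List.filter_append_perm (movableB m) arr))

-- the core equivalence: A's pointwise condition holds iff B's rebuilt candidate is non-decreasing
theorem forall₂_iff_cand_pairwise (m : Int) (arr : List Int) :
    List.Forall₂ (fun a b => a = b ∨ (movableB m a = true ∧ movableB m b = true))
      arr (PySem.List.sorted arr (fun x => x)) ↔
    (rebuildB m arr (PySem.List.sorted (arr.filter (movableB m)) (fun x => x))).Pairwise (· ≤ ·) := by
  set s := PySem.List.sorted arr (fun x => x) with hs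
  have hsp : s.Pairwise (· ≤ ·) := PySem.List.sorted_pairwise arr (fun x => x)
  constructor
  · intro h
    rw [sorted_filter_eq, rebuildB_eq_of_forall₂ m arr s h]
    exact hsp
  · intro h
    have hperm : (rebuildB m arr (PySem.List.sorted (arr.filter (movableB m)) (fun x => x))).Perm s :=
      (cand_perm_arr m arr).trans (PySem.List.sorted_perm arr (fun x => x) false).symm
    have heq : rebuildB m arr (PySem.List.sorted (arr.filter (movableB m)) (fun x => x)) = s :=
      List.Perm.eq_of_pairwise' h hsp hperm
    refine forall₂_of_rebuildB_eq m arr _ s ?_ ?_ heq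
    · intro v hv
      have := (PySem.List.mem_sorted _ _ _ _).mp hv
      exact (List.mem_filter.mp this).2
    · exact (PySem.List.sorted_perm _ _ _).length_eq

theorem mere_array_spec_aux (arr : List Int) : mere_array arr = mere_array_alt arr := by
  cases harr : PySem.List.min? arr (fun x => x) with
  | none => simp [mere_array, mere_array_alt, harr]
  | some m =>
    simp only [mere_array, mere_array_alt, harr]
    set s := PySem.List.sorted arr (fun x => x) with hs
    set cand := rebuildB m arr (PySem.List.sorted (arr.filter (movableB m)) (fun x => x)) with hc
    have hlen : s.length = arr.length := (PySem.List.sorted_perm _ _ _).length_eq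
    -- A's loop succeeds iff the Forall₂ condition holds
    have hA : mereLoopA arr s m (PySem.List.pyRange 0 (arr.length : Int) 1) = "YES" ↔
        List.Forall₂ (fun a b => a = b ∨ (movableB m a = true ∧ movableB m b = true)) arr s := by
      rw [mereLoopA_eq_yes_iff, List.forall₂_iff_get]
      constructor
      · intro h
        refine ⟨hlen.symm, ?_⟩
        intro i h1 h2
        have hi : (i : Int) ∈ PySem.List.pyRange 0 (arr.length : Int) 1 := by
          rw [PySem.List.mem_pyRange_one]
          constructor <;> [positivity; exact_mod_cast h1]
        have := (relAB m _ _).mp (h i hi)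
        rw [PySem.List.pyGetD_eq_getElem arr 0 (by positivity) (by exact_mod_cast h1),
          PySem.List.pyGetD_eq_getElem s 0 (by positivity) (by exact_mod_cast h2)] at this
        simp only [Int.toNat_natCast] at this
        simpa using this
      · rintro ⟨_, h⟩ i hi
        rw [PySem.List.mem_pyRange_one] at hi
        have h1 : i.toNat < arr.length := by omega
        have h2 : i.toNat < s.length := by omega
        rw [PySem.List.pyGetD_eq_getElem arr 0 hi.1 hi.2,
          PySem.List.pyGetD_eq_getElem s 0 hi.1 (by rw [hlen]; exact hi.2)]
        refine (relAB m _ _).mpr ?_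
        simpa using h i.toNat h1 h2
    -- B's test is the Pairwise condition on cand
    have hB : ((cand.zip (PySem.List.slice cand (some 1) none)).all (fun p => decide (p.1 ≤ p.2)) = true) ↔
        cand.Pairwise (· ≤ ·) := by
      rw [PySem.List.slice_from_one, zip_all_le_iff_chain', List.isChain_iff_pairwise]
    by_cases h : List.Forall₂ (fun a b => a = b ∨ (movableB m a = true ∧ movableB m b = true)) arr s
    · rw [hA.mpr h, if_pos (hB.mpr ((forall₂_iff_cand_pairwise m arr).mp h))]
    · have hno : mereLoopA arr s m (PySem.List.pyRange 0 (arr.length : Int) 1) = "NO" := by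
        rcases mereLoopA_yes_or_no arr s m (PySem.List.pyRange 0 (arr.length : Int) 1) with hy | hn
        · exact absurd (hA.mp hy) h
        · exact hn
      rw [hno, if_neg ?_]
      intro hall
      exact h ((forall₂_iff_cand_pairwise m arr).mpr (hB.mp hall))

-- ===== VERDICT (by name: the statement is the Claim_ definition above) =====
theorem mere_array_spec : Claim_equal_mere_array := by
  intro arr _ _
  exact mere_array_spec_aux arr
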